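-- pv_equiv track=rewrite | github.com/dev-mdirfan/Coding-Problem-Solutions | Work@Tech/Python/K-Subarray Sum.py | kSubarraySum2
-- ===== SOURCE A (Python) =====
-- from typing import List
--
-- def kSubarraySum2(A: List[int], k: int) -> List[int]:
--     wSum, ws, we, ans = 0, 0, 0, []
--     while we < len(A):
--         wSum += A[we]
--         if we-ws+1 < k:
--             we += 1
--         elif we-ws+1 == k:
--             ans.append(wSum)
--             wSum -= A[ws]
--             ws += 1
--             we += 1
--     return ans
-- ===== SOURCE B (Python) =====
-- def kSubarraySum2(A, k):
--     # prefix-sum table: prefix[i] = sum of A[:i]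
--     prefix = [0]
--     s = 0
--     for x in A:
--         s += x
--         prefix.append(s)
--     return [prefix[i + k] - prefix[i] for i in range(len(A) - k + 1)]
-- ===== Notes on version B (the rewrite author's own statement) =====
-- stated objective: alternative
-- what changed: Replaces the rolling-window loop (window sum maintained by add/subtract with two sliding indices and per-element branching) by a precomputed prefix-sum table followed by a single range pass taking differences prefix[i+k]-prefix[i].
-- outside the precondition, e.g. on kSubarraySum2([], 0): A returns [], B returns [0]; on kSubarraySum2([], -2): A returns [], B raises IndexError
import Mathlib
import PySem

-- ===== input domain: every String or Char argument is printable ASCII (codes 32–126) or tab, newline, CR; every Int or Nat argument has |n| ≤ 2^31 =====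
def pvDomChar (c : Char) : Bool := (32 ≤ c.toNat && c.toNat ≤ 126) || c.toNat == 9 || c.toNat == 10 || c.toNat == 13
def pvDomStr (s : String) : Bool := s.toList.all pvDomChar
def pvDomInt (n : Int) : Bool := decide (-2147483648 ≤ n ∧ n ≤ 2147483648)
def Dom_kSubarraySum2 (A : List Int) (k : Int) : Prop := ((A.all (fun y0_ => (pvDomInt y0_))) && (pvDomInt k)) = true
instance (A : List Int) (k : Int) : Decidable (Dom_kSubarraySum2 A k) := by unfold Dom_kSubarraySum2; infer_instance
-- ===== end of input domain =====

-- B replaces A's rolling-window sum with a prefix-sum table and a difference pass (alternative algorithm, same cost).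


-- ===== PORT A =====
-- the while loop, step for step; fuel bounds the iteration count (A.length + 1 suffices
-- under Pre_; for k ≤ 0 the Python loop never terminates, which Pre_ excludes).
def kSubLoopA (A : List Int) (k : Int) : Nat → Int → Nat → Nat → List Int → List Int
  | 0, _, _, _, ans => ans
  | fuel+1, wSum, ws, we, ans =>
    if we < A.length then
      let wSum' := wSum + A.getD we 0
      if (we : Int) - ws + 1 < k then
        kSubLoopA A k fuel wSum' ws (we+1) ans
      else if (we : Int) - ws + 1 = k then
        kSubLoopA A k fuel (wSum' - A.getD ws 0) (ws+1) (we+1) (ans ++ [wSum'])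
      else
        -- neither branch fires: the Python loop re-runs with the same ws, we
        kSubLoopA A k fuel wSum' ws we ans
    else ans

def kSubarraySum2 (A : List Int) (k : Int) : List Int :=
  kSubLoopA A k (A.length + 1) 0 0 0 []

-- ===== PORT B =====
-- prefix = [0]; s = 0; for x in A: s += x; prefix.append(s)
def kSubPrefixB (A : List Int) : List Int × Int :=
  A.foldl (fun ps x => (ps.1 ++ [ps.2 + x], ps.2 + x)) ([0], 0)

def kSubarraySum2_alt (A : List Int) (k : Int) : List Int :=
  let pfx := (kSubPrefixB A).1
  (PySem.List.pyRange 0 ((A.length : Int) - k + 1) 1).map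
    (fun i => PySem.List.pyGetD pfx (i + k) 0 - PySem.List.pyGetD pfx i 0)

-- ===== PRECONDITION & SPEC =====
-- Pre_ excludes k ≤ 0: there A loops forever on every non-empty list, and on the empty
-- list the value of a window of non-positive length is an unspecified corner (A gives [],
-- B's prefix formulation gives [0] for k = 0 and raises for k < 0).
def Pre_kSubarraySum2 (_A : List Int) (k : Int) : Prop := 1 ≤ k
instance (A : List Int) (k : Int) : Decidable (Pre_kSubarraySum2 A k) := by unfold Pre_kSubarraySum2; infer_instance
def pvWitness_kSubarraySum2 : List Int × Int := ([1, -2, 3, 4], 2)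

def Spec_kSubarraySum2 (A : List Int) (k : Int) (out : List Int) : Prop := out = kSubarraySum2_alt A k
instance (A : List Int) (k : Int) (out : List Int) : Decidable (Spec_kSubarraySum2 A k out) := by unfold Spec_kSubarraySum2; infer_instance

-- ===== CLAIM (what is proved, stated in full; the proofs are below) =====
def Claim_equal_kSubarraySum2 : Prop := ∀ (A : List Int) (k : Int), Dom_kSubarraySum2 A k → Pre_kSubarraySum2 A k → Spec_kSubarraySum2 A k (kSubarraySum2 A k)

-- ===== LEMMAS AND PROOFS =====

-- sum of the window of length K starting at i
def kSubWin (A : List Int) (K i : Nat) : Int := ((A.drop i).take K).sum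

-- canonical value both ports are proved equal to (for 1 ≤ k, K = k.toNat)
def kSubCanon (A : List Int) (K : Nat) : List Int :=
  (List.range (A.length + 1 - K)).map (kSubWin A K)

lemma kSubWin_eq_takes (A : List Int) (K i : Nat) (_h : i + K ≤ A.length) :
    kSubWin A K i = (A.take (i + K)).sum - (A.take i).sum := by
  have : A.take (i + K) = A.take i ++ (A.drop i).take K := by
    rw [List.take_add]
  rw [kSubWin, this, List.sum_append]; ring

-- A-side invariant
lemma kSubLoopA_inv (A : List Int) (k : Int) (K : Nat) (hk : (K : Int) = k) (hK : 1 ≤ K) :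
    ∀ fuel we ws wSum ans,
      A.length - we < fuel → we ≤ A.length → ws = we - (K - 1) →
      wSum = ((A.drop ws).take (we - ws)).sum →
      kSubLoopA A k fuel wSum ws we ans
        = ans ++ (List.range' ws (A.length + 1 - K - ws)).map (kSubWin A K) := by
  intro fuel
  induction fuel with
  | zero => intro we ws wSum ans hf; omega
  | succ fuel ih =>
    intro we ws wSum ans hf hwe hws hsum
    rw [kSubLoopA]
    by_cases hlt : we < A.length
    · simp only [hlt, if_true]
      have hwslt : ws ≤ we := by omega
      have hsize : we - ws < K := by omega
      have hget : A.getD we 0 = A[we] := List.getD_eq_getElem A 0 hlt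
      have hsum' : wSum + A.getD we 0 = ((A.drop ws).take (we + 1 - ws)).sum := by
        rw [hsum, hget]
        have h1 : we + 1 - ws = (we - ws) + 1 := by omega
        have hidx : we - ws < (A.drop ws).length := by
          simp only [List.length_drop]; omega
        have h2 : (A.drop ws).take ((we - ws) + 1)
            = (A.drop ws).take (we - ws) ++ [(A.drop ws)[we - ws]'hidx] := by
          exact List.take_succ_eq_append_getElem hidx
        rw [h1, h2, List.sum_append]
        have h3 : (A.drop ws)[we - ws]'hidx = A[we] := by
          rw [List.getElem_drop]; congr 1; omega
        simp [h3]
      by_cases hcase : (we : Int) - ws + 1 < k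
      · -- window still growing: we < K - 1, so ws = 0
        have hlt' : we + 1 - ws < K := by omega
        have hws0 : ws = 0 := by omega
        simp only [hcase, if_true]
        rw [ih (we+1) ws _ ans (by omega) (by omega) (by omega) hsum']
      · have heq : (we : Int) - ws + 1 = k := by omega
        simp only [if_neg hcase, if_pos heq]
        have hwin : we + 1 - ws = K := by omega
        have hbound : ws + K ≤ A.length := by omega
        -- appended value is the window sum at ws
        have happ : wSum + A.getD we 0 = kSubWin A K ws := by
          rw [hsum', kSubWin, hwin]
        -- new wSum after subtracting A[ws]
        have hgetws : A.getD ws 0 = A[ws]'(by omega) := List.getD_eq_getElem A 0 (by omega)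
        have hnew : wSum + A.getD we 0 - A.getD ws 0
            = ((A.drop (ws+1)).take (we + 1 - (ws+1))).sum := by
          rw [hsum', hgetws]
          have hd : A.drop ws = A[ws]'(by omega) :: A.drop (ws+1) := by
            rw [List.drop_eq_getElem_cons (by omega)]
          have h1 : we + 1 - ws = (we - ws) + 1 := by omega
          rw [h1, hd, List.take_succ_cons, List.sum_cons]
          have : we + 1 - (ws + 1) = we - ws := by omega
          rw [this]; ring
        rw [ih (we+1) (ws+1) _ _ (by omega) (by omega) (by omega) hnew]
        have hlen : A.length + 1 - K - ws = (A.length + 1 - K - (ws+1)) + 1 := by omega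
        rw [hlen, List.range'_succ, List.map_cons, happ]
        simp
    · simp only [hlt, if_false]
      have : A.length + 1 - K - ws = 0 := by omega
      rw [this]; simp

lemma kSubarraySum2_eq_canon (A : List Int) (k : Int) (hk : 1 ≤ k) :
    kSubarraySum2 A k = kSubCanon A k.toNat := by
  have hK : 1 ≤ k.toNat := by omega
  have hcast : (k.toNat : Int) = k := Int.toNat_of_nonneg (by omega)
  rw [kSubarraySum2, kSubLoopA_inv A k k.toNat hcast hK (A.length + 1) 0 0 0 []
    (by omega) (by omega) (by omega) (by simp)]
  simp [kSubCanon, List.range_eq_range']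

-- B-side: the prefix list
def kSubPartials : Int → List Int → List Int
  | _, [] => []
  | s, x :: A => (s + x) :: kSubPartials (s + x) A

lemma kSubPrefixB_eq (A : List Int) :
    ∀ p s, A.foldl (fun ps x => (ps.1 ++ [ps.2 + x], ps.2 + x)) (p, s)
      = (p ++ kSubPartials s A, s + A.sum) := by
  induction A with
  | nil => intro p s; simp [kSubPartials]
  | cons x A ih =>
    intro p s
    simp only [List.foldl_cons, ih (p ++ [s + x]) (s + x), kSubPartials,
      Prod.mk.injEq, List.sum_cons]
    constructor
    · simp
    · ring

lemma kSubPartials_length (A : List Int) : ∀ s, (kSubPartials s A).length = A.length := by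
  induction A with
  | nil => intro s; rfl
  | cons x A ih => intro s; simp [kSubPartials, ih]

lemma kSubPartials_getElem (A : List Int) :
    ∀ s i (h : i < (kSubPartials s A).length),
      (kSubPartials s A)[i] = s + (A.take (i+1)).sum := by
  induction A with
  | nil => intro s i h; simp [kSubPartials] at h
  | cons x A ih =>
    intro s i h
    cases i with
    | zero => simp [kSubPartials]
    | succ i =>
      simp only [kSubPartials, List.getElem_cons_succ, List.take_succ_cons, List.sum_cons]
      rw [ih (s + x) i (by simp only [kSubPartials, List.length_cons] at h; omega)]
      ring

lemma kSubPrefix_getD (A : List Int) (i : Nat) (h : i ≤ A.length) :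
    (0 :: kSubPartials 0 A).getD i 0 = (A.take i).sum := by
  cases i with
  | zero => simp
  | succ i =>
    have hi : i < (kSubPartials 0 A).length := by rw [kSubPartials_length]; omega
    rw [List.getD_cons_succ, List.getD_eq_getElem _ _ hi]
    simpa using kSubPartials_getElem A 0 i hi

lemma kSubarraySum2_alt_eq_canon (A : List Int) (k : Int) (hk : 1 ≤ k) :
    kSubarraySum2_alt A k = kSubCanon A k.toNat := by
  have hpre : (kSubPrefixB A).1 = 0 :: kSubPartials 0 A := by
    rw [kSubPrefixB, kSubPrefixB_eq A [0] 0]; rfl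
  rw [kSubarraySum2_alt, hpre, PySem.List.pyRange_one, kSubCanon]
  have hlen : ((A.length : Int) - k + 1 - 0).toNat = A.length + 1 - k.toNat := by omega
  rw [hlen, List.map_map]
  apply List.map_congr_left
  intro i hi
  rw [List.mem_range] at hi
  have hik : i + k.toNat ≤ A.length := by omega
  have hcast : (k.toNat : Int) = k := Int.toNat_of_nonneg (by omega)
  have hplen : (0 :: kSubPartials 0 A).length = A.length + 1 := by
    simp [kSubPartials_length]
  simp only [Function.comp_apply, zero_add]
  have h1 : (i : Int) + k = ((i + k.toNat : Nat) : Int) := by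
    rw [Nat.cast_add, hcast]
  rw [h1, PySem.List.pyGetD_natCast, PySem.List.pyGetD_natCast,
    kSubWin_eq_takes A k.toNat i hik]
  rw [kSubPrefix_getD A _ hik, kSubPrefix_getD A i (by omega)]

-- ===== VERDICT (by name: the statement is the Claim_ definition above) =====
theorem kSubarraySum2_spec : Claim_equal_kSubarraySum2 := by
  intro A k _ hpre
  unfold Spec_kSubarraySum2
  rw [kSubarraySum2_eq_canon A k hpre, kSubarraySum2_alt_eq_canon A k hpre]
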